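-- pv_equiv track=rewrite | github.com/uddaniiii/coding-test | 프로그래머스/0/181855. 문자열 묶기/문자열 묶기.py | solution
-- ===== SOURCE A (Python) =====
-- def solution(strArr):
--     d={}
--     keys=[]
--     for s in strArr:
--         keys.append(len(s))
--     d=dict.fromkeys(keys,0)
--
--     for s in strArr:
--         d[len(s)]+=1
--
--     return max(d.values())
-- ===== SOURCE B (Python) =====
-- def solution(strArr):
--     lengths = sorted(len(s) for s in strArr)
--     counts = []
--     cnt = 0
--     prev = None
--     for L in lengths:
--         if L == prev:
--             cnt += 1
--         else:
--             if cnt: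
--                 counts.append(cnt)
--             cnt = 1
--             prev = L
--     if cnt:
--         counts.append(cnt)
--     return max(counts)
-- ===== Notes on version B (the rewrite author's own statement) =====
-- stated objective: alternative
-- what changed: Replaces A's two dict-building passes (fromkeys then per-key increment) by sorting the lengths and counting runs of equal values in one scan, taking the max of the run lengths.
import Mathlib
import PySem

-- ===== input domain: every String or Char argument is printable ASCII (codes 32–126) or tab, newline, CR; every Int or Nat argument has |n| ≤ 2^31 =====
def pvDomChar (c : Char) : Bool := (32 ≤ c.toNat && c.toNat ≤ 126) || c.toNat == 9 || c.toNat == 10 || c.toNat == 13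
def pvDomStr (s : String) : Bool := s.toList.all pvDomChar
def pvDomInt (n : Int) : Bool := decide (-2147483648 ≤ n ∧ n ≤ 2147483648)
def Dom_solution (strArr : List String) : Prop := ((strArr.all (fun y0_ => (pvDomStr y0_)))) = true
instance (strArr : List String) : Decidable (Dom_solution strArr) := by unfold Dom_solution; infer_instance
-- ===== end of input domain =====

-- B replaces A's dict-based counting by sort-then-run-length counting (alternative decomposition, not faster).

-- ===== PORT A =====
def solution (strArr : List String) : Int :=
  -- keys = []; for s in strArr: keys.append(len(s))
  let keys := strArr.foldl (fun acc s => acc ++ [PySem.Str.len s]) []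
  -- d = dict.fromkeys(keys, 0): insert each key with 0 in order (overwrite keeps position) — exact
  let d : PySem.Dict Int Int := keys.foldl (fun d k => d.insert k 0) PySem.Dict.empty
  -- for s in strArr: d[len(s)] += 1   (every len(s) is a key of d, so no KeyError)
  let d := strArr.foldl (fun d s => d.modify (PySem.Str.len s) 0 (· + 1)) d
  -- max(d.values()); none (ValueError on empty) is excluded by Pre_solution
  (PySem.List.max? d.values (fun v => v)).getD 0

-- ===== PORT B =====
-- loop body of Source B's for-loop; state (counts, cnt, prev)
def bStep (st : List Int × Int × Option Int) (L : Int) : List Int × Int × Option Int :=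
  if some L = st.2.2 then (st.1, st.2.1 + 1, st.2.2)
  else ((if st.2.1 ≠ 0 then st.1 ++ [st.2.1] else st.1), 1, some L)

def solution_alt (strArr : List String) : Int :=
  let lengths := PySem.List.sorted (strArr.map (fun s => PySem.Str.len s)) (fun x => x) false
  let st := lengths.foldl bStep (([] : List Int), (0 : Int), (none : Option Int))
  let counts := st.1 ++ (if st.2.1 ≠ 0 then [st.2.1] else [])
  -- max(counts); none (ValueError on empty) is excluded by Pre_solution
  (PySem.List.max? counts (fun v => v)).getD 0

-- ===== PRECONDITION & SPEC =====
-- Pre_ excludes only the empty list, on which A's max(d.values()) raises ValueError (B raises the same way).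
def Pre_solution (strArr : List String) : Prop := strArr ≠ []
instance (strArr : List String) : Decidable (Pre_solution strArr) := by unfold Pre_solution; infer_instance
def pvWitness_solution : List String := (["a", "bc", "d"])

def Spec_solution (strArr : List String) (out : Int) : Prop := out = solution_alt strArr
instance (strArr : List String) (out : Int) : Decidable (Spec_solution strArr out) := by unfold Spec_solution; infer_instance

-- ===== CLAIM (what is proved, stated in full; the proofs are below) =====
def Claim_equal_solution : Prop := ∀ (strArr : List String), Dom_solution strArr → Pre_solution strArr → Spec_solution strArr (solution strArr)

-- ===== LEMMAS AND PROOFS =====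

-- run-length list of the runs of S, a run of p with multiplicity cnt already open
def runs : Int → Int → List Int → List Int
  | _, cnt, [] => [cnt]
  | p, cnt, x :: r => if x = p then runs p (cnt + 1) r else cnt :: runs x 1 r

-- B's loop computes `runs`
lemma foldl_bStep_runs : ∀ (S : List Int) (counts : List Int) (cnt p : Int), 0 < cnt →
    (let st := S.foldl bStep (counts, cnt, some p)
     st.1 ++ (if st.2.1 ≠ 0 then [st.2.1] else [])) = counts ++ runs p cnt S := by
  intro S
  induction S with
  | nil =>
    intro counts cnt p h
    simp [runs]
    omega
  | cons x r ih =>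
    intro counts cnt p h
    by_cases hx : x = p
    · subst hx
      simp only [List.foldl_cons, bStep, runs, if_true]
      exact ih counts (cnt + 1) x (by omega)
    · simp only [List.foldl_cons, bStep, runs]
      rw [if_neg (by simp [hx]), if_neg hx, if_pos (by omega : cnt ≠ 0)]
      rw [ih (counts ++ [cnt]) 1 x (by omega)]
      simp

-- on a sorted tail, the members of `runs` are exactly the element counts
lemma runs_mem : ∀ (S : List Int) (p cnt : Int), List.Pairwise (· ≤ ·) (p :: S) →
    ∀ v : Int, v ∈ runs p cnt S ↔
      (v = cnt + (S.count p : Int) ∨ ∃ k, k ∈ S ∧ k ≠ p ∧ v = (S.count k : Int)) := by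
  intro S
  induction S with
  | nil => intro p cnt _ v; simp [runs]
  | cons x r ih =>
    intro p cnt hp v
    have hpx : p ≤ x := (List.pairwise_cons.1 hp).1 x (by simp)
    have hxr : List.Pairwise (· ≤ ·) (x :: r) := (List.pairwise_cons.1 hp).2
    by_cases hx : x = p
    · subst hx
      rw [runs, if_pos rfl, ih x (cnt + 1) hxr v]
      constructor
      · rintro (h | ⟨k, hk, hkx, hv⟩)
        · left; rw [h]; simp [List.count_cons]; ring
        · right; exact ⟨k, by simp [hk], hkx, by
            rw [hv]; simp [List.count_cons, Ne.symm hkx]⟩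
      · rintro (h | ⟨k, hk, hkx, hv⟩)
        · left; rw [h]; simp [List.count_cons]; ring
        · right
          rcases List.mem_cons.1 hk with h' | h'
          · exact absurd h' hkx
          · exact ⟨k, h', hkx, by rw [hv]; simp [List.count_cons, Ne.symm hkx]⟩
    · have hplt : p < x := lt_of_le_of_ne hpx (fun h => hx h.symm)
      have hrge : ∀ k ∈ r, x ≤ k := (List.pairwise_cons.1 hxr).1
      have hpnot : ∀ k ∈ x :: r, k ≠ p := by
        intro k hk
        rcases List.mem_cons.1 hk with h' | h'
        · omega
        · have := hrge k h'; omega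
      have hcp : (x :: r).count p = 0 :=
        List.count_eq_zero_of_not_mem (fun h => hpnot p h rfl)
      rw [runs, if_neg hx]
      rw [List.mem_cons, ih x 1 hxr v]
      constructor
      · rintro (h | h | ⟨k, hk, hkx, hv⟩)
        · left; rw [hcp]; simpa using h
        · right; exact ⟨x, by simp, hx, by rw [h]; simp [List.count_cons]; ring⟩
        · right; exact ⟨k, by simp [hk], hpnot k (by simp [hk]), by
            rw [hv]; simp [List.count_cons, Ne.symm hkx]⟩
      · rintro (h | ⟨k, hk, hkp, hv⟩)
        · left; rw [hcp] at h; simpa using h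
        · rcases List.mem_cons.1 hk with h' | h'
          · subst h'; right; left
            rw [hv]; simp [List.count_cons]; ring
          · by_cases hkx : k = x
            · subst hkx; right; left; rw [hv]; simp [List.count_cons]; ring
            · right; right; exact ⟨k, h', hkx, by rw [hv]; simp [List.count_cons, Ne.symm hkx]⟩

-- A's fromkeys loop leaves every value at 0
lemma getD_fold_insert_zero : ∀ (L : List Int) (d : PySem.Dict Int Int) (k : Int),
    d.getD k 0 = 0 → (L.foldl (fun d k => d.insert k 0) d).getD k 0 = 0 := by
  intro L
  induction L with
  | nil => intro d k h; simpa using h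
  | cons x r ih =>
    intro d k h
    simp only [List.foldl_cons]
    exact ih _ _ (by rw [PySem.Dict.getD_insert]; split <;> simp [h])

lemma set_update_self : ∀ (xs : List Int) (s : PySem.Set Int), (∀ x ∈ xs, x ∈ s) →
    PySem.Set.update s xs = s := by
  intro xs
  induction xs with
  | nil => intro s _; rfl
  | cons x r ih =>
    intro s h
    have hx : PySem.Set.add s x = s := by
      simp [PySem.Set.add, PySem.Set.contains, h x (by simp)]
    show PySem.Set.update (PySem.Set.add s x) r = s
    rw [hx]; exact ih s (fun y hy => h y (by simp [hy]))

-- max (with default) only depends on the members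
lemma max_ext (xs ys : List Int) (h : ∀ v : Int, v ∈ xs ↔ v ∈ ys) :
    (PySem.List.max? xs (fun v => v)).getD 0 = (PySem.List.max? ys (fun v => v)).getD 0 := by
  match xs, ys with
  | [], [] => rfl
  | [], y :: u => exact absurd ((h y).2 (by simp)) (by simp)
  | x :: t, [] => exact absurd ((h x).1 (by simp)) (by simp)
  | x :: t, y :: u =>
    rw [PySem.List.max?_id_cons, PySem.List.max?_id_cons]
    have hm1 := PySem.List.foldl_max_mem t x
    have hm2 := PySem.List.foldl_max_mem u y
    have hle1 := PySem.List.le_foldl_max t x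
    have hle2 := PySem.List.le_foldl_max u y
    have h1 : List.foldl max x t ∈ y :: u := by
      rcases hm1 with h' | h' <;> [(rw [h']; exact (h x).1 (by simp)); exact (h _).1 (by simp [h'])]
    have h2 : List.foldl max y u ∈ x :: t := by
      rcases hm2 with h' | h' <;> [(rw [h']; exact (h y).2 (by simp)); exact (h _).2 (by simp [h'])]
    have le1 : List.foldl max x t ≤ List.foldl max y u := by
      rcases List.mem_cons.1 h1 with h' | h' <;> [exact h' ▸ hle2.1; exact hle2.2 _ h']
    have le2 : List.foldl max y u ≤ List.foldl max x t := by
      rcases List.mem_cons.1 h2 with h' | h' <;> [exact h' ▸ hle1.1; exact hle1.2 _ h']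
    simp [le_antisymm le1 le2]

-- A's result is the max over the distinct lengths of their counts
lemma solution_eq_counts (strArr : List String) :
    solution strArr = (PySem.List.max?
      ((PySem.Set.ofList (strArr.map (fun s => PySem.Str.len s))).map
        (fun k => ((strArr.map (fun s => PySem.Str.len s)).count k : Int)))
      (fun v => v)).getD 0 := by
  unfold solution
  simp only [PySem.List.foldl_append_singleton_eq_map, List.nil_append]
  set L := strArr.map (fun s => PySem.Str.len s) with hLdef
  set d0 := L.foldl (fun d k => d.insert k (0 : Int)) PySem.Dict.empty with hd0
  set d1 := strArr.foldl (fun d s => d.modify (PySem.Str.len s) 0 (· + 1)) d0 with hd1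
  have hd1' : d1 = L.foldl (fun d k => d.modify k 0 (· + 1)) d0 := by
    rw [hd1, hLdef, List.foldl_map]
  have hkeys0 : d0.keys = PySem.Set.ofList L := by
    rw [hd0, PySem.Dict.keys_foldl_insert (f := fun _ _ => (0 : Int))]
    rfl
  have hkeys1 : d1.keys = PySem.Set.ofList L := by
    rw [hd1, PySem.Dict.keys_foldl_modify_key
      (key := fun s => PySem.Str.len s) (f := fun _ _ v => v + 1), hkeys0]
    exact set_update_self _ _ (fun x hx => (PySem.Set.mem_ofList L x).2 hx)
  have hgetD : ∀ k ∈ PySem.Set.ofList L, d1.getD k 0 = (L.count k : Int) := by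
    intro k _
    rw [hd1', PySem.Dict.getD_foldl_modify_add_one,
      getD_fold_insert_zero L PySem.Dict.empty k (by simp [pysem])]
    simp
  rw [PySem.Dict.values_eq_map_keys d1 (by rw [hkeys1]; exact PySem.Set.nodup_ofList L) 0,
    hkeys1, List.map_congr_left hgetD]

lemma solution_eq_alt (strArr : List String) (hne : strArr ≠ []) :
    solution strArr = solution_alt strArr := by
  rw [solution_eq_counts]
  unfold solution_alt
  set L := strArr.map (fun s => PySem.Str.len s) with hLdef
  have hLne : L ≠ [] := by simp [hLdef, hne]
  have hsne : PySem.List.sorted L (fun x => x) false ≠ [] := by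
    rw [Ne, PySem.List.sorted_eq_nil_iff]; exact hLne
  obtain ⟨x, rest, hs⟩ : ∃ x rest, PySem.List.sorted L (fun x => x) false = x :: rest :=
    List.exists_cons_of_ne_nil hsne
  have hpair : List.Pairwise (· ≤ ·) (x :: rest) := by
    have := PySem.List.sorted_pairwise L (fun x => x)
    rwa [hs] at this
  have hperm : (x :: rest).Perm L := by
    have := PySem.List.sorted_perm L (fun x => x) false
    rwa [hs] at this
  have hstep : bStep ([], 0, none) x = ([], 1, some x) := by simp [bStep]
  have hb := foldl_bStep_runs rest [] 1 x (by omega)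
  simp only at hb
  simp only [hs, List.foldl_cons, hstep, hb, List.nil_append]
  apply max_ext
  intro v
  rw [runs_mem rest x 1 hpair v]
  have hmemA : v ∈ (PySem.Set.ofList L).map (fun k => ((L.count k : Int))) ↔
      ∃ k, k ∈ L ∧ v = (L.count k : Int) := by
    simp only [List.mem_map, PySem.Set.mem_ofList]
    constructor
    · rintro ⟨k, hk, hv⟩; exact ⟨k, hk, hv.symm⟩
    · rintro ⟨k, hk, hv⟩; exact ⟨k, hk, hv.symm⟩
  rw [hmemA]
  constructor
  · rintro ⟨k, hk, hv⟩
    rw [← hperm.count_eq] at hv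
    by_cases hkx : k = x
    · subst hkx
      left; rw [hv, List.count_cons_self]; push_cast; ring
    · right
      have hkmem : k ∈ x :: rest := hperm.mem_iff.2 hk
      refine ⟨k, ?_, hkx, ?_⟩
      · rcases List.mem_cons.1 hkmem with h' | h' <;> [exact absurd h' hkx; exact h']
      · rw [hv]; simp [List.count_cons, Ne.symm hkx]
  · rintro (h | ⟨k, hk, hkx, hv⟩)
    · refine ⟨x, hperm.mem_iff.1 (by simp), ?_⟩
      rw [← hperm.count_eq, h, List.count_cons_self]; push_cast; ring
    · refine ⟨k, hperm.mem_iff.1 (by simp [hk]), ?_⟩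
      rw [← hperm.count_eq, hv]; simp [List.count_cons, Ne.symm hkx]

-- ===== VERDICT (by name: the statement is the Claim_ definition above) =====
theorem solution_spec : Claim_equal_solution := by
  intro strArr _ hpre
  unfold Spec_solution
  exact solution_eq_alt strArr hpre
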